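-- pv_equiv track=rewrite | github.com/abdulhaseeb0330/3semester | old/assignmentAI.py | dailyabsences
-- ===== SOURCE A (Python) =====
-- def dailyabsences(data):
--     days = len(data[0][1])
--     absences = []
--     for day in range(days):
--         count = 0
--         for sid, record in data:
--             if record[day] == 'A':
--                 count += 1
--         absences.append(count)
--
--     return absences
-- ===== SOURCE B (Python) =====
-- def dailyabsences(data):
--     days = len(data[0][1])
--     counts = {}
--     for _sid, record in data:
--         for day in range(days):
--             if record[day] == 'A':
--                 counts[day] = counts.get(day, 0) + 1
--     return [counts.get(day, 0) for day in range(days)]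
-- ===== Notes on version B (the rewrite author's own statement) =====
-- stated objective: alternative
-- what changed: A scans the whole record list once per day (day-outer nested passes building the output list directly); B makes one record-outer pass that accumulates absence counts into a dictionary keyed by day, then renders the result list from the dictionary.
import Mathlib
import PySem

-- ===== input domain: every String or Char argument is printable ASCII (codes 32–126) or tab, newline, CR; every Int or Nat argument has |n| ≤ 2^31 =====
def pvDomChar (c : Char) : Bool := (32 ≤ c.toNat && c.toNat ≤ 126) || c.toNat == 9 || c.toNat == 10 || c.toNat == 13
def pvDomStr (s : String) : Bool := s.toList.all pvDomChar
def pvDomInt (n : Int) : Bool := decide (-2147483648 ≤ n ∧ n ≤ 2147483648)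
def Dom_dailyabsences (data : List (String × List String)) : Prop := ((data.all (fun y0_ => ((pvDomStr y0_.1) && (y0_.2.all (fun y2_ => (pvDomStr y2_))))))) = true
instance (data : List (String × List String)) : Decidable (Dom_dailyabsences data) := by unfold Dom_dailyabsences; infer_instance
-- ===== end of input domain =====

-- B replaces A's day-outer nested passes (which build the output list directly) by a
-- single record-outer pass accumulating absence counts into a dictionary keyed by day,
-- then renders the result list from the dictionary (alternative decomposition, same
-- asymptotic cost). Return-value equivalence only; neither mutates its input.

-- ===== PORT A =====
def dailyabsences (data : List (String × List String)) : List Int :=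
  let days := match data with | [] => 0 | (_, r) :: _ => r.length
  (List.range days).foldl
    (fun absences (day : Nat) =>
      absences ++ [data.foldl
        (fun count p =>
          if PySem.List.pyGet? p.2 (day : Int) == some "A" then count + 1 else count)
        (0 : Int)])
    []

-- ===== PORT B =====
def dailyabsences_alt (data : List (String × List String)) : List Int :=
  let days := match data with | [] => 0 | (_, r) :: _ => r.length
  let counts : PySem.Dict Int Int :=
    data.foldl
      (fun counts p =>
        (PySem.List.pyRange 0 (days : Int) 1).foldl
          (fun counts day =>
            if PySem.List.pyGet? p.2 day == some "A"
            then counts.insert day (counts.getD day 0 + 1)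
            else counts)
          counts)
      PySem.Dict.empty
  (PySem.List.pyRange 0 (days : Int) 1).map (fun day => counts.getD day 0)

-- ===== PRECONDITION & SPEC =====
-- Pre_ excludes exactly the inputs on which Python A raises IndexError: empty data
-- (data[0] fails) and data in which some record is shorter than the first record.
def Pre_dailyabsences (data : List (String × List String)) : Prop :=
  data ≠ [] ∧ ∀ p ∈ data, (data.headD ("", [])).2.length ≤ p.2.length
instance (data : List (String × List String)) : Decidable (Pre_dailyabsences data) := by
  unfold Pre_dailyabsences; infer_instance

def pvWitness_dailyabsences : (List (String × List String)) :=
  [("s1", ["A", "P"]), ("s2", ["P", "A"]), ("s3", ["A", "A"])]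

def Spec_dailyabsences (data : List (String × List String)) (out : List Int) : Prop := out = dailyabsences_alt data
instance (data : List (String × List String)) (out : List Int) : Decidable (Spec_dailyabsences data out) := by unfold Spec_dailyabsences; infer_instance

-- ===== CLAIM (what is proved, stated in full; the proofs are below) =====
def Claim_equal_dailyabsences : Prop := ∀ (data : List (String × List String)), Dom_dailyabsences data → Pre_dailyabsences data → Spec_dailyabsences data (dailyabsences data)

-- ===== LEMMAS AND PROOFS =====

-- per-record contribution of day d
def pvCnt (p : String × List String) (d : Int) : Int :=
  if PySem.List.pyGet? p.2 d == some "A" then 1 else 0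

-- A's inner loop is an accumulating sum of pvCnt
theorem pvInnerA (data : List (String × List String)) (d : Int) (a : Int) :
    data.foldl
      (fun count p =>
        if PySem.List.pyGet? p.2 d == some "A" then count + 1 else count) a
    = a + (data.map (fun p => pvCnt p d)).sum := by
  have h : (fun (count : Int) (p : String × List String) =>
      if PySem.List.pyGet? p.2 d == some "A" then count + 1 else count)
      = fun count p => count + pvCnt p d := by
    funext count p; unfold pvCnt; split <;> simp
  rw [h, PySem.List.foldl_add]

-- B's inner conditional-insert loop, read at one key: it adds that record's
-- number of matching days among the iterated range
theorem pvInnerB (p : String × List String) (rng : List Int)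
    (d : PySem.Dict Int Int) (j : Int) :
    (rng.foldl
      (fun counts day =>
        if PySem.List.pyGet? p.2 day == some "A"
        then counts.insert day (counts.getD day 0 + 1)
        else counts) d).getD j 0
    = d.getD j 0 +
      ((rng.filter (fun day => PySem.List.pyGet? p.2 day == some "A")).count j : Int) := by
  rw [← List.foldl_filter]
  exact PySem.Dict.getD_foldl_insert_add_one _ _ _

-- B's whole accumulation, read at one key
theorem pvFoldB (data : List (String × List String)) (rng : List Int)
    (d : PySem.Dict Int Int) (j : Int) :
    (data.foldl
      (fun counts p =>
        rng.foldl
          (fun counts day =>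
            if PySem.List.pyGet? p.2 day == some "A"
            then counts.insert day (counts.getD day 0 + 1)
            else counts) counts) d).getD j 0
    = d.getD j 0 +
      (data.map (fun p =>
        ((rng.filter (fun day => PySem.List.pyGet? p.2 day == some "A")).count j : Int))).sum := by
  induction data generalizing d with
  | nil => simp
  | cons p rest ih =>
    simp only [List.foldl_cons, ih, pvInnerB, List.map_cons, List.sum_cons]
    ring

-- on a nodup range containing j, that per-record count is exactly pvCnt
theorem pvCountFilter (p : String × List String) (rng : List Int) (j : Int)
    (hnd : rng.Nodup) (hj : j ∈ rng) :
    ((rng.filter (fun day => PySem.List.pyGet? p.2 day == some "A")).count j : Int)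
      = pvCnt p j := by
  unfold pvCnt
  by_cases h : PySem.List.pyGet? p.2 j = some "A"
  · have hm : j ∈ rng.filter (fun day => PySem.List.pyGet? p.2 day == some "A") := by
      simp [List.mem_filter, hj, h]
    rw [List.count_eq_one_of_mem (hnd.filter _) hm]
    simp [h]
  · have hm : j ∉ rng.filter (fun day => PySem.List.pyGet? p.2 day == some "A") := by
      simp [List.mem_filter, h]
    rw [List.count_eq_zero_of_not_mem hm]
    simp [h]

theorem pvPortsEq (data : List (String × List String)) :
    dailyabsences data = dailyabsences_alt data := by
  obtain _ | ⟨⟨s, r⟩, tl⟩ := data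
  · simp [dailyabsences, dailyabsences_alt, PySem.List.pyRange]
  unfold dailyabsences dailyabsences_alt
  dsimp only
  rw [PySem.List.foldl_append_singleton_eq_map, PySem.List.pyRange_zero_natCast]
  simp only [List.nil_append, List.map_map]
  refine List.map_congr_left (fun k hk => ?_)
  rw [List.mem_range] at hk
  rw [pvInnerA]
  simp only [Function.comp_apply]
  rw [pvFoldB]
  simp only [PySem.Dict.getD_empty, zero_add]
  refine congrArg List.sum (List.map_congr_left (fun p _ => ?_))
  refine (pvCountFilter p _ _ ?_ ?_).symm
  · exact List.nodup_range.map (fun a b => Int.natCast_inj.mp)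
  · exact List.mem_map.mpr ⟨k, List.mem_range.mpr hk, rfl⟩

-- ===== VERDICT (by name: the statement is the Claim_ definition above) =====
theorem dailyabsences_spec : Claim_equal_dailyabsences := by
  intro data _ _
  exact pvPortsEq data
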